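-- pv_equiv track=rewrite | github.com/Sharan-Ravula/CS-335-Advanced-Chess-App | scrips/chess_app.py | get_path_between
-- ===== SOURCE A (Python) =====
-- def get_path_between(start, end):
--     """Get the path between two points on the board (for blocking checks)."""
--     path = []
--     x1, y1 = start
--     x2, y2 = end
--
--     if x1 == x2:  # Vertical line
--         step = 1 if y2 > y1 else -1
--         for y in range(y1 + step, y2, step):
--             path.append((x1, y))
--     elif y1 == y2:  # Horizontal line
--         step = 1 if x2 > x1 else -1
--         for x in range(x1 + step, x2, step):
--             path.append((x, y1))
--     elif abs(x2 - x1) == abs(y2 - y1):  # Diagonal line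
--         x_step = 1 if x2 > x1 else -1
--         y_step = 1 if y2 > y1 else -1
--         for i in range(1, abs(x2 - x1)):
--             path.append((x1 + i * x_step, y1 + i * y_step))
--
--     return path
-- ===== SOURCE B (Python) =====
-- def get_path_between(start, end):
--     """Get the path between two points on the board (for blocking checks)."""
--     x1, y1 = start
--     x2, y2 = end
--     if x1 != x2 and y1 != y2 and abs(x2 - x1) != abs(y2 - y1):
--         return []
--     # walk backwards from end toward start, collecting squares in reverse,
--     # then flip once at the end
--     rev = []
--     x, y = x2, y2
--     while True:
--         x += (x1 > x) - (x1 < x)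
--         y += (y1 > y) - (y1 < y)
--         if (x, y) == (x1, y1):
--             return rev[::-1]
--         rev.append((x, y))
-- ===== Notes on version B (the rewrite author's own statement) =====
-- stated objective: alternative
-- what changed: Instead of A's three branch-specific forward counted loops, B checks alignment once, then walks square-by-square backwards from end toward start with a while-loop and an arrival test (no range/no precomputed length), collecting the squares in reverse and flipping the list once at the end.
import Mathlib
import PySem

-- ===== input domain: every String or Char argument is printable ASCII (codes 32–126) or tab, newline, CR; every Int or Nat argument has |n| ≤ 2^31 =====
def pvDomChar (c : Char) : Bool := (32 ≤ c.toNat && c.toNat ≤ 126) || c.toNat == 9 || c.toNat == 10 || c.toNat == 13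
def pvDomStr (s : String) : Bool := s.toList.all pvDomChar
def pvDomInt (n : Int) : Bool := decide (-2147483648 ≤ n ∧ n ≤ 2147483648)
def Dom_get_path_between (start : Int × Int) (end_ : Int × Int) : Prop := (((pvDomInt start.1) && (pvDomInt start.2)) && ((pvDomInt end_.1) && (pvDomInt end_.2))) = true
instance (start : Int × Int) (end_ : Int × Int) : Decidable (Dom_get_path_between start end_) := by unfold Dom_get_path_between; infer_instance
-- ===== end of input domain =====

-- B replaces A's three branch-specific counted forward loops by an alignment guard and a
-- backward square-by-square walk from end toward start with an arrival test, reversed once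
-- at the end (objective: alternative).

-- ===== PORT A =====
def get_path_between (start : Int × Int) (end_ : Int × Int) : List (Int × Int) :=
  let x1 := start.1; let y1 := start.2
  let x2 := end_.1; let y2 := end_.2
  if x1 = x2 then  -- Vertical line
    let step : Int := if y2 > y1 then 1 else -1
    (PySem.List.pyRange (y1 + step) y2 step).map (fun y => (x1, y))
  else if y1 = y2 then  -- Horizontal line
    let step : Int := if x2 > x1 then 1 else -1
    (PySem.List.pyRange (x1 + step) x2 step).map (fun x => (x, y1))
  else if (x2 - x1).natAbs = (y2 - y1).natAbs then  -- Diagonal line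
    let x_step : Int := if x2 > x1 then 1 else -1
    let y_step : Int := if y2 > y1 then 1 else -1
    (PySem.List.pyRange 1 ((x2 - x1).natAbs : Int) 1).map (fun i => (x1 + i * x_step, y1 + i * y_step))
  else []

-- ===== PORT B =====
-- fuel for the backward walk (a totality guard only): Chebyshev distance to the target,
-- exactly the number of steps after which the walk has arrived
def pvCheb (tx ty x y : Int) : Nat := max (tx - x).natAbs (ty - y).natAbs

-- 'while True: step toward (tx,ty); stop on arrival; else collect' — the walk of Source B
def pvWalkBack : Nat → Int → Int → Int → Int → List (Int × Int) → List (Int × Int)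
  | 0, _, _, _, _, rev => rev.reverse
  | fuel + 1, tx, ty, x, y, rev =>
    let nx : Int := x + ((if tx > x then (1:Int) else 0) - (if tx < x then (1:Int) else 0))
    let ny : Int := y + ((if ty > y then (1:Int) else 0) - (if ty < y then (1:Int) else 0))
    if nx = tx ∧ ny = ty then rev.reverse
    else pvWalkBack fuel tx ty nx ny (rev ++ [(nx, ny)])

def get_path_between_alt (start : Int × Int) (end_ : Int × Int) : List (Int × Int) :=
  let x1 := start.1; let y1 := start.2
  let x2 := end_.1; let y2 := end_.2
  if x1 ≠ x2 ∧ y1 ≠ y2 ∧ (x2 - x1).natAbs ≠ (y2 - y1).natAbs then []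
  else pvWalkBack (pvCheb x1 y1 x2 y2) x1 y1 x2 y2 []

-- ===== PRECONDITION & SPEC =====
def Spec_get_path_between (start : Int × Int) (end_ : Int × Int) (out : List (Int × Int)) : Prop := out = get_path_between_alt start end_
instance (start : Int × Int) (end_ : Int × Int) (out : List (Int × Int)) : Decidable (Spec_get_path_between start end_ out) := by unfold Spec_get_path_between; infer_instance

-- ===== CLAIM (what is proved, stated in full; the proofs are below) =====
def Claim_equal_get_path_between : Prop := ∀ (start : Int × Int) (end_ : Int × Int), Dom_get_path_between start end_ → Spec_get_path_between start end_ (get_path_between start end_)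

-- ===== LEMMAS AND PROOFS =====

-- the backward walk from a point at distance k along a fixed step vector (sx,sy)
lemma pvWalkBack_eq (k : Nat) (tx ty x y sx sy : Int) (rev : List (Int × Int))
    (hsx : sx = -1 ∨ sx = 0 ∨ sx = 1) (hsy : sy = -1 ∨ sy = 0 ∨ sy = 1)
    (hx : tx - x = k * sx) (hy : ty - y = k * sy)
    (hk : sx = 0 → sy = 0 → k = 0) :
    pvWalkBack k tx ty x y rev
      = (rev ++ (List.range (k - 1)).map
            (fun (j : Nat) => (x + ((j : Int) + 1) * sx, y + ((j : Int) + 1) * sy))).reverse := by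
  induction k generalizing x y rev with
  | zero =>
      rw [pvWalkBack]
      simp
  | succ m ih =>
      rw [pvWalkBack]
      have hnx : x + ((if tx > x then (1:Int) else 0) - (if tx < x then (1:Int) else 0)) = x + sx := by
        rcases hsx with h | h | h <;> subst h <;>
          (split_ifs with h1 h2 <;> omega) 
      have hny : y + ((if ty > y then (1:Int) else 0) - (if ty < y then (1:Int) else 0)) = y + sy := by
        rcases hsy with h | h | h <;> subst h <;>
          (split_ifs with h1 h2 <;> omega)
      simp only [hnx, hny]
      rcases Nat.eq_zero_or_pos m with hm | hm
      · subst hm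
        have : x + sx = tx ∧ y + sy = ty := by constructor <;> omega
        rw [if_pos this]
        simp
      · obtain ⟨m', rfl⟩ : ∃ m', m = m' + 1 := ⟨m - 1, by omega⟩
        have hns : ¬ (sx = 0 ∧ sy = 0) := by
          intro ⟨h1, h2⟩; exact absurd (hk h1 h2) (by omega)
        have hcond : ¬ (x + sx = tx ∧ y + sy = ty) := by
          intro ⟨h1, h2⟩
          rcases hsx with h | h | h <;> rcases hsy with h' | h' | h' <;> subst h <;> subst h' <;>
            first | exact hns ⟨rfl, rfl⟩ | omega
        rw [if_neg hcond]
        rw [ih (x + sx) (y + sy) (rev ++ [(x + sx, y + sy)])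
            (by push_cast at hx ⊢; linarith) (by push_cast at hy ⊢; linarith)
            (fun h1 h2 => absurd ⟨h1, h2⟩ hns)]
        congr 1
        rw [List.append_assoc]
        congr 1
        have hr : List.range (m' + 1 + 1 - 1) = 0 :: (List.range (m' + 1 - 1)).map (· + 1) := by
          simp [List.range_succ_eq_map]
        rw [hr]
        simp only [List.map_cons, List.map_map, List.singleton_append]
        congr 1
        · norm_num
        · apply List.map_congr_left
          intro j _
          simp only [Function.comp_apply, Prod.mk.injEq]
          push_cast
          constructor <;> ring
  
-- the walk result written forwards from the target side
lemma pvWalkBack_forward (k : Nat) (tx ty x y sx sy : Int)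
    (hsx : sx = -1 ∨ sx = 0 ∨ sx = 1) (hsy : sy = -1 ∨ sy = 0 ∨ sy = 1)
    (hx : tx - x = k * sx) (hy : ty - y = k * sy)
    (hk : sx = 0 → sy = 0 → k = 0) :
    pvWalkBack k tx ty x y []
      = (List.range (k - 1)).map
          (fun (i : Nat) => (tx - ((i : Int) + 1) * sx, ty - ((i : Int) + 1) * sy)) := by
  rw [pvWalkBack_eq k tx ty x y sx sy [] hsx hsy hx hy hk]
  simp only [List.nil_append]
  apply List.ext_getElem
  · simp
  · intro i h1 h2
    simp only [List.getElem_reverse, List.length_map, List.length_range,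
      List.getElem_map, List.getElem_range] at *
    have hi : i < k - 1 := by simpa using h2
    have hc1 : ((k - 1 - 1 - i : Nat) : Int) + 1 = (k : Int) - 1 - (i : Int) := by omega
    rw [hc1]
    simp only [Prod.mk.injEq]
    constructor
    · rw [show tx = x + (k : Int) * sx by omega]; ring
    · rw [show ty = y + (k : Int) * sy by omega]; ring

-- map over equal-length ranges with pointwise-equal functions
lemma map_range_eq {α : Type} (m n : Nat) (f g : Nat → α)
    (hmn : m = n) (hfg : ∀ k, f k = g k) :
    (List.range m).map f = (List.range n).map g := by
  subst hmn; exact List.map_congr_left (fun k _ => hfg k)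

-- ===== VERDICT (by name: the statement is the Claim_ definition above) =====
theorem get_path_between_spec : Claim_equal_get_path_between := by
  intro s e _
  obtain ⟨x1, y1⟩ := s
  obtain ⟨x2, y2⟩ := e
  show get_path_between (x1, y1) (x2, y2) = get_path_between_alt (x1, y1) (x2, y2)
  simp only [get_path_between, get_path_between_alt]
  by_cases hx : x1 = x2
  · subst hx
    rw [if_pos rfl,
      if_neg (show ¬(x1 ≠ x1 ∧ y1 ≠ y2 ∧ (x1 - x1).natAbs ≠ (y2 - y1).natAbs) by simp)]
    by_cases hy : y2 > y1
    · rw [if_pos hy,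
        show pvCheb x1 y1 x1 y2 = (y2 - y1).natAbs from by unfold pvCheb; omega,
        pvWalkBack_forward ((y2 - y1).natAbs) x1 y1 x1 y2 0 (-1)
          (by norm_num) (by norm_num) (by omega) (by omega) (by intro _ h; omega),
        PySem.List.pyRange_one, List.map_map]
      apply map_range_eq _ _ _ _ (by omega)
      intro j
      simp only [Function.comp_apply, Prod.mk.injEq]
      constructor <;> ring
    · rw [if_neg hy]
      by_cases hy2 : y2 = y1
      · subst hy2
        rw [PySem.List.pyRange_neg_one_eq_nil (by omega),
          show pvCheb x1 y2 x1 y2 = 0 from by unfold pvCheb; omega,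
          pvWalkBack_forward 0 x1 y2 x1 y2 0 0
            (by norm_num) (by norm_num) (by omega) (by omega) (by intro _ _; rfl)]
        simp
      · rw [show pvCheb x1 y1 x1 y2 = (y1 - y2).natAbs from by unfold pvCheb; omega,
          pvWalkBack_forward ((y1 - y2).natAbs) x1 y1 x1 y2 0 1
            (by norm_num) (by norm_num) (by omega) (by omega) (by intro _ h; omega),
          PySem.List.pyRange_neg_one, List.map_map]
        apply map_range_eq _ _ _ _ (by omega)
        intro j
        simp only [Function.comp_apply, Prod.mk.injEq]
        constructor <;> ring
  · rw [if_neg hx]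
    by_cases hy : y1 = y2
    · subst hy
      rw [if_pos rfl,
        if_neg (show ¬(x1 ≠ x2 ∧ y1 ≠ y1 ∧ (x2 - x1).natAbs ≠ (y1 - y1).natAbs) by simp)]
      by_cases hx2 : x2 > x1
      · rw [if_pos hx2,
          show pvCheb x1 y1 x2 y1 = (x2 - x1).natAbs from by unfold pvCheb; omega,
          pvWalkBack_forward ((x2 - x1).natAbs) x1 y1 x2 y1 (-1) 0
            (by norm_num) (by norm_num) (by omega) (by omega) (by intro h _; omega),
          PySem.List.pyRange_one, List.map_map]
        apply map_range_eq _ _ _ _ (by omega)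
        intro j
        simp only [Function.comp_apply, Prod.mk.injEq]
        constructor <;> ring
      · rw [if_neg hx2,
          show pvCheb x1 y1 x2 y1 = (x1 - x2).natAbs from by unfold pvCheb; omega,
          pvWalkBack_forward ((x1 - x2).natAbs) x1 y1 x2 y1 1 0
            (by norm_num) (by norm_num) (by omega) (by omega) (by intro h _; omega),
          PySem.List.pyRange_neg_one, List.map_map]
        apply map_range_eq _ _ _ _ (by omega)
        intro j
        simp only [Function.comp_apply, Prod.mk.injEq]
        constructor <;> ring
    · rw [if_neg hy]
      by_cases hd : (x2 - x1).natAbs = (y2 - y1).natAbs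
      · rw [if_pos hd,
          if_neg (show ¬(x1 ≠ x2 ∧ y1 ≠ y2 ∧ (x2 - x1).natAbs ≠ (y2 - y1).natAbs) by simp [hd])]
        by_cases hx2 : x2 > x1 <;> by_cases hy2 : y2 > y1
        · rw [if_pos hx2, if_pos hy2,
            show pvCheb x1 y1 x2 y2 = (x2 - x1).natAbs from by unfold pvCheb; omega,
            pvWalkBack_forward ((x2 - x1).natAbs) x1 y1 x2 y2 (-1) (-1)
              (by norm_num) (by norm_num) (by omega) (by omega) (by intro h _; omega),
            PySem.List.pyRange_one, List.map_map]
          apply map_range_eq _ _ _ _ (by omega)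
          intro j
          simp only [Function.comp_apply, Prod.mk.injEq]
          constructor <;> ring
        · rw [if_pos hx2, if_neg hy2,
            show pvCheb x1 y1 x2 y2 = (x2 - x1).natAbs from by unfold pvCheb; omega,
            pvWalkBack_forward ((x2 - x1).natAbs) x1 y1 x2 y2 (-1) 1
              (by norm_num) (by norm_num) (by omega) (by omega) (by intro h _; omega),
            PySem.List.pyRange_one, List.map_map]
          apply map_range_eq _ _ _ _ (by omega)
          intro j
          simp only [Function.comp_apply, Prod.mk.injEq]
          constructor <;> ring
        · rw [if_neg hx2, if_pos hy2,
            show pvCheb x1 y1 x2 y2 = (x2 - x1).natAbs from by unfold pvCheb; omega,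
            pvWalkBack_forward ((x2 - x1).natAbs) x1 y1 x2 y2 1 (-1)
              (by norm_num) (by norm_num) (by omega) (by omega) (by intro h _; omega),
            PySem.List.pyRange_one, List.map_map]
          apply map_range_eq _ _ _ _ (by omega)
          intro j
          simp only [Function.comp_apply, Prod.mk.injEq]
          constructor <;> ring
        · rw [if_neg hx2, if_neg hy2,
            show pvCheb x1 y1 x2 y2 = (x2 - x1).natAbs from by unfold pvCheb; omega,
            pvWalkBack_forward ((x2 - x1).natAbs) x1 y1 x2 y2 1 1
              (by norm_num) (by norm_num) (by omega) (by omega) (by intro h _; omega),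
            PySem.List.pyRange_one, List.map_map]
          apply map_range_eq _ _ _ _ (by omega)
          intro j
          simp only [Function.comp_apply, Prod.mk.injEq]
          constructor <;> ring
      · rw [if_neg hd, if_pos ⟨hx, hy, hd⟩]
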